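-- pv_equiv track=rewrite | github.com/samuelhwilliams/advent-of-code | 2023/day_03.py | yield_all_possible_parts_with_boundaries
-- ===== SOURCE A (Python) =====
-- from typing import Iterator
--
-- def yield_all_possible_parts_with_boundaries(
--     grid: tuple[tuple[str, ...], ...]
-- ) -> Iterator[tuple[int, tuple[int, int], tuple[int, int]]]:
--     """Read the entire schematic and yield ((x, y1), (x, y2)) coords pairs encapsulating all possible part numbers"""
--     for x, row in enumerate(grid):
--         y1 = None
--         for y, char in enumerate(row):
--             if char.isdigit():
--                 if y1 is None:
--                     # Starting character of a part number
--                     y1 = y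
--             else:
--                 if y1 is not None:
--                     # We've moved beyond the last character of a part number, yield it and its grid co-ords
--                     yield int("".join(row[y1:y])), (x, y1), (x, y)
--                     y1 = None
--         if y1 is not None:
--             # We've moved beyond the last character of a part number, yield it and its grid co-ords
--             yield int("".join(row[y1 : y + 1])), (x, y1), (x, y)
-- ===== SOURCE B (Python) =====
-- def yield_all_possible_parts_with_boundaries(grid):
--     """Two-pointer run extraction: skip non-digit cells, then consume a whole
--     digit run at once and yield it with its clamped end coordinate."""
--     for x, row in enumerate(grid):
--         n = len(row)
--         y = 0
--         while y < n:
--             if row[y].isdigit():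
--                 start = y
--                 while y < n and row[y].isdigit():
--                     y += 1
--                 yield int("".join(row[start:y])), (x, start), (x, min(y, n - 1))
--             else:
--                 y += 1
-- ===== Notes on version B (the rewrite author's own statement) =====
-- stated objective: alternative
-- what changed: Replaces A's sentinel-state (y1-is-None) cell-by-cell scan with a two-pointer run extraction: skip non-digit cells, then consume each digit run whole with an inner loop and yield it with its clamped end coordinate min(end, len(row)-1).
import Mathlib
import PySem

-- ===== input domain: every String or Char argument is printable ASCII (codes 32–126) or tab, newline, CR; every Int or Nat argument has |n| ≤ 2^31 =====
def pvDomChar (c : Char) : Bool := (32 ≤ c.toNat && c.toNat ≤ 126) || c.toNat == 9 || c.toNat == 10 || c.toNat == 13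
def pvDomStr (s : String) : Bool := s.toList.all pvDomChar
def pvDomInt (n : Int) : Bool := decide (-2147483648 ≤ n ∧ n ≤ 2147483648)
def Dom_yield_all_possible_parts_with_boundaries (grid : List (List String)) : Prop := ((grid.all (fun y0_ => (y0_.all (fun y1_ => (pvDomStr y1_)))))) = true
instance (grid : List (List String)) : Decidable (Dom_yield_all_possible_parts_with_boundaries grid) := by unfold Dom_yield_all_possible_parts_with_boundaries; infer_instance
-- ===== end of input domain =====

-- B replaces A's sentinel-state (`y1 is None`) character-by-character scan with a
-- two-pointer run extraction (skip non-digit cells, consume each digit run whole);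
-- objective: alternative structure, same O(total cells) cost.

-- ===== PORT A =====
-- int("".join(row[a:b])): in both programs the slice holds only cells with
-- .isdigit() true (ASCII digit strings under Dom), so int() never raises; the
-- `getD 0` default is unreachable.
def pvNum (row : List String) (a b : Int) : Int :=
  (PySem.Int.ofStr? (PySem.Str.join "" (PySem.List.slice row (some a) (some b)))).getD 0

-- inner `for y, char in enumerate(row)` loop body, state = (yielded so far, y1)
def pvAStep (x : Int) (row : List String)
    (st : List (Int × (Int × Int) × (Int × Int)) × Option Int) (p : Int × String) :
    List (Int × (Int × Int) × (Int × Int)) × Option Int :=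
  if PySem.Str.strIsdigit p.2 then
    match st.2 with
    | none => (st.1, some p.1)
    | some _ => st
  else
    match st.2 with
    | some s => (st.1 ++ [(pvNum row s p.1, (x, s), (x, p.1))], none)
    | none => st

-- one row of A: run the scan, then the trailing flush (there y = len(row) - 1)
def pvARow (x : Int) (row : List String) : List (Int × (Int × Int) × (Int × Int)) :=
  let st := (PySem.List.enumerate row).foldl (pvAStep x row) ([], none)
  match st.2 with
  | some s =>
      let y : Int := (row.length : Int) - 1
      st.1 ++ [(pvNum row s (y + 1), (x, s), (x, y))]
  | none => st.1

def yield_all_possible_parts_with_boundaries (grid : List (List String)) : List (Int × (Int × Int) × (Int × Int)) :=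
  (PySem.List.enumerate grid).foldl (fun acc p => acc ++ pvARow p.1 p.2) []

-- ===== PORT B =====
-- Both while loops are transliterated as structural recursion on a fuel
-- argument; fuel starts at n = len(row) and bounds the iteration count (y
-- strictly increases each step and the loops stop at y = n), so the fuel-0
-- branch is never reached on the actual calls.

-- `while y < n and row[y].isdigit(): y += 1`  (row.getD y "" is exact: the guard
-- ensures y < n = row.length, so it is Python's in-range row[y])
def pvBInner (row : List String) (n : Nat) : Nat → Nat → Nat
  | 0, y => y
  | fuel + 1, y =>
    if y < n then
      if PySem.Str.strIsdigit (row.getD y "") then pvBInner row n fuel (y + 1) else y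
    else y

-- outer `while y < n` loop of one row
def pvBRow (x : Int) (row : List String) (n : Nat) : Nat → Nat → List (Int × (Int × Int) × (Int × Int))
  | 0, _ => []
  | fuel + 1, y =>
    if y < n then
      if PySem.Str.strIsdigit (row.getD y "") then
        let y' := pvBInner row n (fuel + 1) y
        (pvNum row (y : Int) (y' : Int), (x, (y : Int)), (x, ((min y' (n - 1) : Nat) : Int)))
          :: pvBRow x row n fuel y'
      else pvBRow x row n fuel (y + 1)
    else []

def yield_all_possible_parts_with_boundaries_alt (grid : List (List String)) : List (Int × (Int × Int) × (Int × Int)) :=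
  (PySem.List.enumerate grid).foldl (fun acc p => acc ++ pvBRow p.1 p.2 p.2.length p.2.length 0) []

-- ===== PRECONDITION & SPEC =====
def Spec_yield_all_possible_parts_with_boundaries (grid : List (List String)) (out : List (Int × (Int × Int) × (Int × Int))) : Prop := out = yield_all_possible_parts_with_boundaries_alt grid
instance (grid : List (List String)) (out : List (Int × (Int × Int) × (Int × Int))) : Decidable (Spec_yield_all_possible_parts_with_boundaries grid out) := by unfold Spec_yield_all_possible_parts_with_boundaries; infer_instance

-- ===== CLAIM (what is proved, stated in full; the proofs are below) =====
def Claim_equal_yield_all_possible_parts_with_boundaries : Prop := ∀ (grid : List (List String)), Dom_yield_all_possible_parts_with_boundaries grid → Spec_yield_all_possible_parts_with_boundaries grid (yield_all_possible_parts_with_boundaries grid)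

-- ===== LEMMAS AND PROOFS =====

-- A's trailing flush applied to a scan state
def pvAFlush (x : Int) (row : List String)
    (st : List (Int × (Int × Int) × (Int × Int)) × Option Int) : List (Int × (Int × Int) × (Int × Int)) :=
  match st.2 with
  | some s =>
      let y : Int := (row.length : Int) - 1
      st.1 ++ [(pvNum row s (y + 1), (x, s), (x, y))]
  | none => st.1

theorem pvBInner_le (row : List String) (n : Nat) :
    ∀ (f y : Nat), y ≤ pvBInner row n f y := by
  intro f
  induction f with
  | zero => intro y; simp [pvBInner]
  | succ f ih =>
    intro y
    rw [pvBInner]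
    split_ifs with h1 h2
    · exact le_trans (by omega) (ih (y + 1))
    · exact le_refl y
    · exact le_refl y

-- any fuel ≥ n - y computes the same inner-while result
theorem pvBInner_fuel (row : List String) (n : Nat) :
    ∀ (f g y : Nat), n - y ≤ f → n - y ≤ g → pvBInner row n f y = pvBInner row n g y := by
  intro f
  induction f with
  | zero =>
    intro g y hf hg
    have hy : ¬ y < n := by omega
    cases g with
    | zero => rfl
    | succ g => rw [pvBInner, pvBInner, if_neg hy]
  | succ f ih =>
    intro g y hf hg
    cases g with
    | zero =>
      have hy : ¬ y < n := by omega
      rw [pvBInner, pvBInner, if_neg hy]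
    | succ g =>
      rw [pvBInner, pvBInner]
      split_ifs with h1 h2
      · exact ih g (y + 1) (by omega) (by omega)
      · rfl
      · rfl

theorem pvBRow_at_end (x : Int) (row : List String) (n : Nat) :
    ∀ (f : Nat), pvBRow x row n f n = [] := by
  intro f; cases f <;> simp [pvBRow]

-- Joint induction (on the length of the untraversed suffix): A's scan from
-- position y agrees with B's loop from y (with any sufficient fuel), both for
-- state `none` and, inside a run begun at s, for state `some s` (where B emits
-- the run ending at the inner-while result).
theorem pvBoth (x : Int) (row : List String) :
    ∀ (k y : Nat), row.length - y = k → y ≤ row.length →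
      ((∀ (fuel : Nat), row.length - y ≤ fuel → ∀ acc,
          pvAFlush x row ((PySem.List.enumerate (row.drop y) (y : Int)).foldl (pvAStep x row) (acc, none))
            = acc ++ pvBRow x row row.length fuel y)
       ∧ (0 < row.length → ∀ (s : Int) acc (fuel : Nat),
          row.length - pvBInner row row.length (row.length - y) y ≤ fuel →
          pvAFlush x row ((PySem.List.enumerate (row.drop y) (y : Int)).foldl (pvAStep x row) (acc, some s))
            = acc ++ (pvNum row s ((pvBInner row row.length (row.length - y) y : Nat) : Int), (x, s),
                      (x, ((min (pvBInner row row.length (row.length - y) y) (row.length - 1) : Nat) : Int)))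
                :: pvBRow x row row.length fuel (pvBInner row row.length (row.length - y) y))) := by
  intro k
  induction k with
  | zero =>
    intro y hk hy
    have hy' : y = row.length := by omega
    subst hy'
    have he : pvBInner row row.length (row.length - row.length) row.length = row.length := by
      simp [pvBInner]
    constructor
    · intro fuel hfuel acc
      simp [List.drop_length, PySem.List.enumerate_nil, pvAFlush, pvBRow_at_end]
    · intro hn s acc fuel hfuel
      simp only [List.drop_length, PySem.List.enumerate_nil, List.foldl_nil, pvAFlush, he,
        pvBRow_at_end]
      have h1 : ((row.length : Int) - 1) + 1 = (row.length : Int) := by ring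
      have h2 : min row.length (row.length - 1) = row.length - 1 := by omega
      have h3 : ((row.length - 1 : Nat) : Int) = (row.length : Int) - 1 := by
        push_cast [Nat.cast_sub hn]; ring
      rw [h1, h2, h3]
  | succ k ih =>
    intro y hk hy
    have hlt : y < row.length := by omega
    have hdrop : row.drop y = row[y] :: row.drop (y + 1) := List.drop_eq_getElem_cons hlt
    have hget : row.getD y "" = row[y] := by
      rw [List.getD_eq_getElem?_getD, List.getElem?_eq_getElem hlt]; rfl
    have hcast : (y : Int) + 1 = ((y + 1 : Nat) : Int) := by push_cast; ring
    have hm : row.length - y = (row.length - (y + 1)) + 1 := by omega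
    obtain ⟨ihn, ihs⟩ := ih (y + 1) (by omega) (by omega)
    by_cases hd : PySem.Str.strIsdigit row[y] = true
    · -- current cell is a digit cell
      have hinner : pvBInner row row.length (row.length - y) y
          = pvBInner row row.length (row.length - (y + 1)) (y + 1) := by
        rw [hm, pvBInner, if_pos hlt, hget, if_pos hd]
      have hele : y + 1 ≤ pvBInner row row.length (row.length - y) y := by
        rw [hinner]; exact pvBInner_le row row.length _ (y + 1)
      constructor
      · intro fuel hfuel acc
        obtain ⟨f, rfl⟩ : ∃ f, fuel = f + 1 := ⟨fuel - 1, by omega⟩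
        rw [hdrop, PySem.List.enumerate_cons, List.foldl_cons, hcast]
        have hstep : pvAStep x row (acc, none) ((y : Int), row[y]) = (acc, some (y : Int)) := by
          simp only [pvAStep, hd]; rfl
        rw [hstep, ihs (by omega) (y : Int) acc f (by omega)]
        rw [pvBRow, if_pos hlt, hget, if_pos hd]
        rw [pvBInner_fuel row row.length (f + 1) (row.length - y) y (by omega) (by omega), hinner]
      · intro hn s acc fuel hfuel
        rw [hdrop, PySem.List.enumerate_cons, List.foldl_cons, hcast]
        have hstep : pvAStep x row (acc, some s) ((y : Int), row[y]) = (acc, some s) := by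
          simp only [pvAStep, hd]; rfl
        rw [hstep, hinner]
        exact ihs hn s acc fuel (by rw [← hinner]; omega)
    · -- current cell is not a digit cell
      have hinner : pvBInner row row.length (row.length - y) y = y := by
        rw [hm, pvBInner, if_pos hlt, hget, if_neg hd]
      constructor
      · intro fuel hfuel acc
        obtain ⟨f, rfl⟩ : ∃ f, fuel = f + 1 := ⟨fuel - 1, by omega⟩
        rw [hdrop, PySem.List.enumerate_cons, List.foldl_cons, hcast]
        have hstep : pvAStep x row (acc, none) ((y : Int), row[y]) = (acc, none) := by
          simp only [pvAStep, if_neg hd]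
        rw [hstep, ihn f (by omega) acc, pvBRow, if_pos hlt, hget, if_neg hd]
      · intro hn s acc fuel hfuel
        obtain ⟨f, rfl⟩ : ∃ f, fuel = f + 1 := ⟨fuel - 1, by rw [hinner] at hfuel; omega⟩
        rw [hdrop, PySem.List.enumerate_cons, List.foldl_cons, hcast]
        have hstep : pvAStep x row (acc, some s) ((y : Int), row[y])
            = (acc ++ [(pvNum row s (y : Int), (x, s), (x, (y : Int)))], none) := by
          simp only [pvAStep, if_neg hd]
        rw [hstep, ihn f (by omega) _, hinner]
        have hmin : min y (row.length - 1) = y := by omega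
        have hB : pvBRow x row row.length (f + 1) y = pvBRow x row row.length f (y + 1) := by
          rw [pvBRow, if_pos hlt, hget, if_neg hd]
        rw [hB]
        simp [hmin]

theorem pvRow_eq (x : Int) (row : List String) :
    pvARow x row = pvBRow x row row.length row.length 0 := by
  have h := ((pvBoth x row row.length 0 (by omega) (Nat.zero_le _)).1) row.length (by omega) []
  simpa [pvAFlush, pvARow] using h

-- ===== VERDICT (by name: the statement is the Claim_ definition above) =====
theorem yield_all_possible_parts_with_boundaries_spec : Claim_equal_yield_all_possible_parts_with_boundaries := by
  intro grid _
  unfold Spec_yield_all_possible_parts_with_boundaries yield_all_possible_parts_with_boundaries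
    yield_all_possible_parts_with_boundaries_alt
  congr 1
  funext acc p
  rw [pvRow_eq]
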